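-- pv_equiv track=rewrite | github.com/TheMonk2121/ai-dev-tasks | dspy-rag-system/src/utils/memory_rehydrator.py | round_robin_by_file
-- ===== SOURCE A (Python) =====
-- from typing import Any, Dict, List, Optional, Tuple
--
-- PER_FILE_ROUND_ROBIN = 2
--
-- def round_robin_by_file(items: List[Dict[str, Any]], per_file: int = PER_FILE_ROUND_ROBIN) -> List[Dict[str, Any]]:
--     """Cheap diversity: interleave by file, cap per-file on first pass."""
--     from collections import defaultdict, deque
--
--     buckets = defaultdict(list)
--     for d in items:
--         buckets[d.get("file", "")].append(d)
--
--     # buckets already sorted by 'score' due to prior sort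
--     queues = {f: deque(lst[:]) for f, lst in buckets.items()}
--     taken = []
--     per_file_count = {f: 0 for f in queues.keys()}
--
--     # pass 1: up to per_file each
--     progressed = True
--     while progressed:
--         progressed = False
--         for f, q in queues.items():
--             if q and per_file_count[f] < per_file:
--                 taken.append(q.popleft())
--                 per_file_count[f] += 1
--                 progressed = True
--
--     # pass 2: if budget remains later, caller will truncate by tokens;
--     # we keep remaining order stable:
--     leftovers = []
--     for f, q in queues.items():
--         leftovers.extend(list(q))
--     return taken + leftovers
-- ===== SOURCE B (Python) =====
-- PER_FILE_ROUND_ROBIN = 2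
--
-- def round_robin_by_file(items, per_file=PER_FILE_ROUND_ROBIN):
--     """Cheap diversity: interleave by file, cap per-file on first pass."""
--     buckets = {}
--     for d in items:
--         buckets.setdefault(d.get("file", ""), []).append(d)
--
--     cap = max(per_file, 0)
--     longest = 0
--     for lst in buckets.values():
--         longest = max(longest, len(lst))
--     rounds = min(cap, longest)
--
--     # round r takes the r-th element of every bucket that still has one
--     taken = [lst[r] for r in range(rounds) for lst in buckets.values() if r < len(lst)]
--     leftovers = [x for lst in buckets.values() for x in lst[cap:]]
--     return taken + leftovers
-- ===== Notes on version B (the rewrite author's own statement) =====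
-- stated objective: simpler
-- what changed: Replaces the deque/per-file-counter/progressed-flag while loop by direct round indexing: after the same order-preserving bucketing, round r simply appends lst[r] from every bucket with more than r items for r < min(per_file, longest bucket), and leftovers are the slices lst[max(per_file,0):].
import Mathlib
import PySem

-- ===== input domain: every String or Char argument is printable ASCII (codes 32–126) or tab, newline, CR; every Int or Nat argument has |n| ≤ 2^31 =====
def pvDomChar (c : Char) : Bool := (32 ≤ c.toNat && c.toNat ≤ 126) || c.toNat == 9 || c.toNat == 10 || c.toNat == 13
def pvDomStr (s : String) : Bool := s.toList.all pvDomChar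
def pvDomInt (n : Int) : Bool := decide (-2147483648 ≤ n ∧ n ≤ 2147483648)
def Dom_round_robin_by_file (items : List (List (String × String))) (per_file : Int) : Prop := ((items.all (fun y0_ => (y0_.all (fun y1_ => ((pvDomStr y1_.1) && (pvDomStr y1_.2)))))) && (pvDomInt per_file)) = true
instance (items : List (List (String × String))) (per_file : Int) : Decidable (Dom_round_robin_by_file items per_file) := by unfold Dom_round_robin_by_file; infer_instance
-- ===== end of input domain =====

-- B replaces A's deque/per-file-counter/progressed-flag while loop by direct
-- round indexing over the buckets (round r takes lst[r]); objective: simpler.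

-- ===== PORT A =====
-- buckets = defaultdict(list); for d in items: buckets[d.get("file","")].append(d)
-- (defaultdict append is exactly Dict.modify key [] (· ++ [d]))
def pvBucketsA (items : List (List (String × String))) :
    PySem.Dict String (List (List (String × String))) :=
  items.foldl
    (fun b d => b.modify (PySem.Dict.getD (PySem.Dict.mk d) "file" "") [] (· ++ [d]))
    PySem.Dict.empty

-- one sweep of the 'for f, q in queues.items()' body (queues as its assoc list,
-- counts as the per_file_count dict); returns (queues, counts, appended, progressed)
def pvPassA (pf : Int) :
    List (String × List (List (String × String))) → PySem.Dict String Int →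
    List (String × List (List (String × String))) × PySem.Dict String Int ×
      List (List (String × String)) × Bool
  | [], c => ([], c, [], false)
  | (f, q) :: rest, c =>
    match q with
    | [] =>
      let r := pvPassA pf rest c
      ((f, q) :: r.1, r.2.1, r.2.2.1, r.2.2.2)
    | x :: xs =>
      if PySem.Dict.getD c f 0 < pf then
        let r := pvPassA pf rest (PySem.Dict.insert c f (PySem.Dict.getD c f 0 + 1))
        ((f, xs) :: r.1, r.2.1, x :: r.2.2.1, true)
      else
        let r := pvPassA pf rest c
        ((f, q) :: r.1, r.2.1, r.2.2.1, r.2.2.2)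

-- 'while progressed:' — fuel bounds the rounds (the loop makes at most
-- min(per_file, longest bucket) + 1 sweeps, so per_file.toNat + 1 never runs out)
def pvLoopA (pf : Int) :
    Nat → List (String × List (List (String × String))) → PySem.Dict String Int →
    List (List (String × String)) →
    List (List (String × String)) × List (String × List (List (String × String)))
  | 0, qs, _, taken => (taken, qs)
  | fuel + 1, qs, c, taken =>
    let r := pvPassA pf qs c
    if r.2.2.2 then pvLoopA pf fuel r.1 r.2.1 (taken ++ r.2.2.1)
    else (taken ++ r.2.2.1, r.1)

def round_robin_by_file (items : List (List (String × String))) (per_file : Int) :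
    List (List (String × String)) :=
  let buckets := pvBucketsA items
  let queues := buckets.items                                   -- {f: deque(lst[:])}
  let counts := queues.foldl (fun c e => c.insert e.1 (0 : Int)) PySem.Dict.empty
  let r := pvLoopA per_file (per_file.toNat + 1) queues counts []
  let leftovers := r.2.foldl (fun acc e => acc ++ e.2) []
  r.1 ++ leftovers

-- ===== PORT B =====
-- buckets.setdefault(d.get("file",""), []).append(d) — same dict operation as
-- d[k] = d.get(k, []) + [d], i.e. Dict.modify k [] (· ++ [d]); exact
def pvBucketsB (items : List (List (String × String))) :
    PySem.Dict String (List (List (String × String))) :=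
  items.foldl
    (fun b d => b.modify (PySem.Dict.getD (PySem.Dict.mk d) "file" "") [] (· ++ [d]))
    PySem.Dict.empty

def round_robin_by_file_alt (items : List (List (String × String))) (per_file : Int) :
    List (List (String × String)) :=
  let buckets := pvBucketsB items
  let cap := max per_file 0
  let longest := buckets.items.foldl (fun m e => max m (PySem.List.len e.2)) 0
  let rounds := min cap longest
  let taken := (PySem.List.pyRange 0 rounds 1).foldl
    (fun acc r => buckets.items.foldl
      (fun acc2 e => if r < PySem.List.len e.2 then acc2 ++ [PySem.List.pyGetD e.2 r []] else acc2)
      acc) []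
  let leftovers := buckets.items.foldl (fun acc e => acc ++ PySem.List.slice e.2 (some cap) none) []
  taken ++ leftovers

-- ===== PRECONDITION & SPEC =====
def Spec_round_robin_by_file (items : List (List (String × String))) (per_file : Int) (out : List (List (String × String))) : Prop := out = round_robin_by_file_alt items per_file
instance (items : List (List (String × String))) (per_file : Int) (out : List (List (String × String))) : Decidable (Spec_round_robin_by_file items per_file out) := by unfold Spec_round_robin_by_file; infer_instance

-- ===== CLAIM (what is proved, stated in full; the proofs are below) =====
def Claim_equal_round_robin_by_file : Prop := ∀ (items : List (List (String × String))) (per_file : Int), Dom_round_robin_by_file items per_file → Spec_round_robin_by_file items per_file (round_robin_by_file items per_file)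


-- ===== LEMMAS AND PROOFS =====

-- notation for the proof layer
abbrev pvItem : Type := List (String × String)
abbrev pvEntry : Type := String × List pvItem

-- how many items round r has removed from a bucket of contents l (cap capN)
def pvMr (capN r : Nat) (l : List pvItem) : Nat := min r (min l.length capN)
-- the queues after r full rounds
def pvStateQ (capN r : Nat) (bs : List pvEntry) : List pvEntry :=
  bs.map (fun e => (e.1, e.2.drop (pvMr capN r e.2)))
-- what round r appends
def pvRoundT (capN r : Nat) (bs : List pvEntry) : List pvItem :=
  bs.flatMap (fun e => ((e.2.take capN).drop r).take 1)
-- the longest bucket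
def pvMN (bs : List pvEntry) : Nat := (bs.map (fun e => e.2.length)).foldl max 0

lemma pvPassA_spec (pf : Int) : ∀ (qs : List pvEntry) (c : PySem.Dict String Int),
    (qs.map Prod.fst).Nodup →
    (pvPassA pf qs c).1 = qs.map (fun e => if PySem.Dict.getD c e.1 0 < pf then (e.1, e.2.drop 1) else e) ∧
    (pvPassA pf qs c).2.2.1 = qs.flatMap (fun e => if PySem.Dict.getD c e.1 0 < pf then e.2.take 1 else []) ∧
    (pvPassA pf qs c).2.2.2 = qs.any (fun e => !e.2.isEmpty && decide (PySem.Dict.getD c e.1 0 < pf)) ∧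
    (∀ e ∈ qs, PySem.Dict.getD (pvPassA pf qs c).2.1 e.1 0 =
      if e.2 ≠ [] ∧ PySem.Dict.getD c e.1 0 < pf then PySem.Dict.getD c e.1 0 + 1 else PySem.Dict.getD c e.1 0) ∧
    (∀ g, g ∉ qs.map Prod.fst → PySem.Dict.getD (pvPassA pf qs c).2.1 g 0 = PySem.Dict.getD c g 0) := by
  intro qs
  induction qs with
  | nil => intro c _; simp [pvPassA]
  | cons e rest ih =>
    obtain ⟨f, q⟩ := e
    intro c hnd
    simp only [List.map_cons, List.nodup_cons, List.mem_map] at hnd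
    obtain ⟨hf, hnd'⟩ := hnd
    have hfk : f ∉ rest.map Prod.fst := by
      intro h
      obtain ⟨e', he', h1⟩ := List.mem_map.mp h
      exact hf ⟨e', he', h1⟩
    match q with
    | [] =>
      obtain ⟨ih1, ih2, ih3, ih4, ih5⟩ := ih c hnd'
      refine ⟨?_, ?_, ?_, ?_, ?_⟩
      · simp only [pvPassA, List.map_cons, ih1]
        congr 1
        split <;> rfl
      · simp only [pvPassA, List.flatMap_cons, ih2]
        split <;> simp
      · simp only [pvPassA, List.any_cons, ih3]
        simp
      · intro e he
        rcases List.mem_cons.mp he with rfl | he'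
        · simp only [pvPassA, ih5 f hfk]
          simp
        · simpa only [pvPassA] using ih4 e he'
      · intro g hg
        simp only [List.map_cons, List.mem_cons] at hg
        push Not at hg
        simpa only [pvPassA] using ih5 g (fun h => hg.2 (by simpa using h))
    | x :: xs =>
      by_cases hc : PySem.Dict.getD c f 0 < pf
      · have hkey : ∀ e' ∈ rest, e'.1 ≠ f := by
          intro e' he' h
          exact hf ⟨e', he', h⟩
        have hrw : ∀ e' ∈ rest,
            PySem.Dict.getD (PySem.Dict.insert c f (PySem.Dict.getD c f 0 + 1)) e'.1 0 =
              PySem.Dict.getD c e'.1 0 := by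
          intro e' he'
          exact PySem.Dict.getD_insert_of_ne c _ _ (hkey e' he')
        obtain ⟨ih1, ih2, ih3, ih4, ih5⟩ :=
          ih (PySem.Dict.insert c f (PySem.Dict.getD c f 0 + 1)) hnd'
        refine ⟨?_, ?_, ?_, ?_, ?_⟩
        · simp only [pvPassA, if_pos hc, List.map_cons, ih1]
          refine congrArg₂ _ rfl (List.map_congr_left ?_)
          intro e' he'
          rw [hrw e' he']
        · simp only [pvPassA, List.flatMap_cons, ih2, if_pos hc]
          refine congrArg₂ _ rfl (List.flatMap_congr ?_)
          intro e' he'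
          rw [hrw e' he']
        · simp only [pvPassA, if_pos hc, List.any_cons]
          simp [hc]
        · intro e he
          rcases List.mem_cons.mp he with rfl | he'
          · simp only [pvPassA, if_pos hc]
            rw [ih5 f hfk, PySem.Dict.getD_insert]
            simp [hc]
          · simp only [pvPassA, if_pos hc]
            rw [ih4 e he', hrw e he']
        · intro g hg
          simp only [List.map_cons, List.mem_cons] at hg
          push Not at hg
          simp only [pvPassA, if_pos hc]
          rw [ih5 g (fun h => hg.2 (by simpa using h)),
            PySem.Dict.getD_insert_of_ne c _ _ hg.1]
      · obtain ⟨ih1, ih2, ih3, ih4, ih5⟩ := ih c hnd'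
        refine ⟨?_, ?_, ?_, ?_, ?_⟩
        · simp only [pvPassA, List.map_cons, ih1, if_neg hc]
        · simp only [pvPassA, List.flatMap_cons, ih2, if_neg hc]
          simp
        · simp only [pvPassA, if_neg hc, List.any_cons, ih3]
          simp [hc]
        · intro e he
          rcases List.mem_cons.mp he with rfl | he'
          · simp only [pvPassA, if_neg hc, ih5 f hfk]
            simp [hc]
          · simpa only [pvPassA, if_neg hc] using ih4 e he'
        · intro g hg
          simp only [List.map_cons, List.mem_cons] at hg
          push Not at hg
          simpa only [pvPassA, if_neg hc] using ih5 g (fun h => hg.2 (by simpa using h))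

-- the progressed-test of one queue, in terms of the original bucket contents
lemma pvActive_iff (pf : Int) (r : Nat) (l : List pvItem) :
    (l.drop (pvMr pf.toNat r l) ≠ [] ∧ ((pvMr pf.toNat r l : Nat) : Int) < pf) ↔
      r < min l.length pf.toNat := by
  rw [Ne, List.drop_eq_nil_iff, pvMr]; omega

lemma pvFlag_iff (capN r : Nat) (bs : List pvEntry) :
    bs.any (fun e => decide (r < min e.2.length capN)) = decide (r < min capN (pvMN bs)) := by
  rcases Bool.eq_false_or_eq_true (bs.any (fun e => decide (r < min e.2.length capN))) with hb | hb <;>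
    rw [hb] <;> symm <;> simp at hb
  · obtain ⟨f, l, he, h1, h2⟩ := hb
    refine decide_eq_true ?_
    have hle : l.length ≤ (bs.map (fun e => e.2.length)).foldl max 0 :=
      (PySem.List.le_foldl_max (bs.map (fun e => e.2.length)) 0).2 _
        (List.mem_map_of_mem he)
    unfold pvMN
    omega
  · refine decide_eq_false ?_
    intro hlt
    rcases (PySem.List.foldl_max_mem (bs.map (fun e => e.2.length)) 0) with h0 | hmem
    · unfold pvMN at hlt; omega
    · obtain ⟨⟨f, l⟩, he, hlen⟩ := List.mem_map.mp hmem
      have h2 := hb f l he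
      have hlen' : l.length = (bs.map (fun e => e.2.length)).foldl max 0 := hlen
      unfold pvMN at hlt
      omega
lemma pvStep_eq (pf : Int) (r : Nat) (l : List pvItem) :
    (if ((pvMr pf.toNat r l : Nat) : Int) < pf then (l.drop (pvMr pf.toNat r l)).drop 1
     else l.drop (pvMr pf.toNat r l)) = l.drop (pvMr pf.toNat (r + 1) l) := by
  split
  · rename_i h
    by_cases hlen : pvMr pf.toNat r l < l.length
    · rw [List.drop_drop,
        show pvMr pf.toNat r l + 1 = pvMr pf.toNat (r + 1) l by unfold pvMr at *; omega]
    · rw [List.drop_eq_nil_of_le (as := l.drop (pvMr pf.toNat r l)) (by rw [List.length_drop]; omega),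
        List.drop_eq_nil_of_le (by unfold pvMr at *; omega)]
  · rename_i h
    rw [show pvMr pf.toNat (r + 1) l = pvMr pf.toNat r l by unfold pvMr at *; omega]
lemma pvContrib_eq (pf : Int) (r : Nat) (l : List pvItem) :
    (if ((pvMr pf.toNat r l : Nat) : Int) < pf then (l.drop (pvMr pf.toNat r l)).take 1 else []) =
      ((l.take pf.toNat).drop r).take 1 := by
  rw [List.drop_take, List.take_take]
  split
  · rename_i h
    by_cases hlen : pvMr pf.toNat r l < l.length
    · rw [show pvMr pf.toNat r l = r by unfold pvMr at *; omega,
        show min 1 (pf.toNat - r) = 1 by unfold pvMr at *; omega]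
    · rw [List.take_eq_nil_of_eq_nil (List.drop_eq_nil_of_le (by omega)),
        List.take_eq_nil_of_eq_nil (List.drop_eq_nil_of_le (by unfold pvMr at *; omega))]
  · rename_i h
    rw [show min 1 (pf.toNat - r) = 0 by unfold pvMr at *; omega, List.take_zero]
lemma pvLoopA_spec (pf : Int) (bs : List pvEntry) (hnd : (bs.map Prod.fst).Nodup) :
    ∀ (fuel r : Nat) (c : PySem.Dict String Int) (taken : List pvItem),
    r ≤ min pf.toNat (pvMN bs) → min pf.toNat (pvMN bs) - r < fuel →
    (∀ e ∈ bs, PySem.Dict.getD c e.1 0 = ((pvMr pf.toNat r e.2 : Nat) : Int)) →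
    pvLoopA pf fuel (pvStateQ pf.toNat r bs) c taken =
      (taken ++ ((List.range (min pf.toNat (pvMN bs) - r)).map
          (fun j => pvRoundT pf.toNat (r + j) bs)).flatten,
       pvStateQ pf.toNat (min pf.toNat (pvMN bs)) bs) := by
  intro fuel
  induction fuel with
  | zero => intro r c taken _ hfuel _; omega
  | succ fuel ih =>
    intro r c taken hr hfuel hc
    have hkeys : (pvStateQ pf.toNat r bs).map Prod.fst = bs.map Prod.fst := by
      simp [pvStateQ, List.map_map, Function.comp_def]
    have hndq : ((pvStateQ pf.toNat r bs).map Prod.fst).Nodup := by rw [hkeys]; exact hnd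
    obtain ⟨h1, h2, h3, h4, h5⟩ := pvPassA_spec pf (pvStateQ pf.toNat r bs) c hndq
    have hbool : ∀ (m : List pvItem), (!m.isEmpty) = decide (m ≠ []) := by
      intro m; cases m <;> simp
    have hflag : (pvPassA pf (pvStateQ pf.toNat r bs) c).2.2.2 =
        decide (r < min pf.toNat (pvMN bs)) := by
      rw [h3, pvStateQ, List.any_map, ← pvFlag_iff pf.toNat r bs]
      refine PySem.List.any_congr_mem ?_
      intro e he
      simp only [Function.comp_apply]
      rw [hc e he, hbool, ← Bool.decide_and, decide_eq_decide]
      exact pvActive_iff pf r e.2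
    have ht : (pvPassA pf (pvStateQ pf.toNat r bs) c).2.2.1 = pvRoundT pf.toNat r bs := by
      rw [h2, pvStateQ, List.flatMap_map, pvRoundT]
      refine List.flatMap_congr ?_
      intro e he
      rw [hc e he]
      exact pvContrib_eq pf r e.2
    have hq : (pvPassA pf (pvStateQ pf.toNat r bs) c).1 = pvStateQ pf.toNat (r + 1) bs := by
      rw [h1, pvStateQ, pvStateQ, List.map_map]
      refine List.map_congr_left ?_
      intro e he
      simp only [Function.comp_apply]
      rw [hc e he, ← apply_ite (fun l => (e.1, l))]
      exact congrArg _ (pvStep_eq pf r e.2)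
    by_cases hrR : r < min pf.toNat (pvMN bs)
    · have hcnt : ∀ e ∈ bs, PySem.Dict.getD (pvPassA pf (pvStateQ pf.toNat r bs) c).2.1 e.1 0 =
          ((pvMr pf.toNat (r + 1) e.2 : Nat) : Int) := by
        intro e he
        have hmem : (e.1, e.2.drop (pvMr pf.toNat r e.2)) ∈ pvStateQ pf.toNat r bs :=
          List.mem_map_of_mem he
        have h4' := h4 _ hmem
        rw [hc e he] at h4'
        rw [h4']
        by_cases ha : r < min e.2.length pf.toNat
        · rw [if_pos ((pvActive_iff pf r e.2).mpr ha),
            show pvMr pf.toNat (r + 1) e.2 = pvMr pf.toNat r e.2 + 1 by simp only [pvMr]; omega]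
          push_cast
          ring
        · rw [if_neg (fun hcon => ha ((pvActive_iff pf r e.2).mp hcon)),
            show pvMr pf.toNat (r + 1) e.2 = pvMr pf.toNat r e.2 by simp only [pvMr] at ha ⊢; omega]
      simp only [pvLoopA]
      rw [hflag, if_pos (by simp [hrR]), hq, ht,
        ih (r + 1) _ (taken ++ pvRoundT pf.toNat r bs) (by omega) (by omega) hcnt,
        List.append_assoc]
      refine congrArg₂ _ (congrArg _ ?_) rfl
      rw [show min pf.toNat (pvMN bs) - r = (min pf.toNat (pvMN bs) - (r + 1)) + 1 by omega,
        List.range_succ_eq_map, List.map_cons, List.flatten_cons, List.map_map]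
      refine congrArg₂ _ (by simp) (congrArg _ (List.map_congr_left ?_))
      intro j _
      simp only [Function.comp_apply]
      congr 1
      omega
    · have hreq : r = min pf.toNat (pvMN bs) := by omega
      have hnil : pvRoundT pf.toNat r bs = [] := by
        rw [pvRoundT, List.flatMap_eq_nil_iff]
        intro e he
        have hle : e.2.length ≤ pvMN bs :=
          (PySem.List.le_foldl_max (bs.map (fun e => e.2.length)) 0).2 _ (List.mem_map_of_mem he)
        rw [List.take_eq_nil_of_eq_nil (List.drop_eq_nil_of_le (by rw [List.length_take]; omega))]
      have hstate : pvStateQ pf.toNat (r + 1) bs = pvStateQ pf.toNat r bs := by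
        rw [pvStateQ, pvStateQ]
        refine List.map_congr_left ?_
        intro e he
        have hle : e.2.length ≤ pvMN bs :=
          (PySem.List.le_foldl_max (bs.map (fun e => e.2.length)) 0).2 _ (List.mem_map_of_mem he)
        rw [show pvMr pf.toNat (r + 1) e.2 = pvMr pf.toNat r e.2 by simp only [pvMr]; omega]
      simp only [pvLoopA]
      rw [hflag, if_neg (by simp [hrR]), hq, ht, hnil, hstate, hreq]
      simp

lemma pvCounts0 : ∀ (l : List pvEntry) (c : PySem.Dict String Int),
    (∀ g, PySem.Dict.getD c g 0 = 0) → ∀ g,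
    PySem.Dict.getD (l.foldl (fun c e => c.insert e.1 (0 : Int)) c) g 0 = 0 := by
  intro l
  induction l with
  | nil => intro c h g; exact h g
  | cons e rest ih =>
    intro c h g
    refine ih _ (fun g' => ?_) g
    rw [PySem.Dict.getD_insert]
    split <;> simp [h]

lemma pvLongest (bs : List pvEntry) : ∀ (a : Nat),
    bs.foldl (fun m e => max m (PySem.List.len e.2)) ((a : Nat) : Int) =
      ((bs.foldl (fun m e => max m e.2.length) a : Nat) : Int) := by
  induction bs with
  | nil => intro a; rfl
  | cons e rest ih =>
    intro a
    simp only [List.foldl_cons, PySem.List.len_eq]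
    rw [show max ((a : Nat) : Int) ((e.2.length : Nat) : Int) = ((max a e.2.length : Nat) : Int) by push_cast; rfl]
    exact ih _

lemma pvContribB (pf : Int) (r : Nat) (hcap : r < pf.toNat) (l : List pvItem) :
    (if ((r : Nat) : Int) < PySem.List.len l then [PySem.List.pyGetD l ((r : Nat) : Int) []] else []) =
      ((l.take pf.toNat).drop r).take 1 := by
  rw [List.drop_take, List.take_take, show min 1 (pf.toNat - r) = 1 by omega]
  split
  · rename_i h
    rw [PySem.List.len_eq] at h
    have hr : r < l.length := by exact_mod_cast h
    rw [PySem.List.pyGetD_natCast, List.getD_eq_getElem l [] hr,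
      List.drop_eq_getElem_cons hr, List.take_succ_cons, List.take_zero]
  · rename_i h
    rw [PySem.List.len_eq] at h
    rw [List.drop_eq_nil_of_le (by omega), List.take_nil]
lemma pvLeft_eq (capN R : Nat) (l : List pvItem) (h : l.length ≤ R ∨ capN ≤ R) :
    l.drop (pvMr capN R l) = l.drop capN := by
  rcases Nat.lt_or_ge (min R l.length) capN with hlt | hge
  · rw [List.drop_eq_nil_of_le (by unfold pvMr; omega),
      List.drop_eq_nil_of_le (by omega)]
  · congr 1; unfold pvMr; omega

-- the bucket keys are distinct
lemma pvBucketsA_keys_nodup (items : List pvItem) :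
    ((pvBucketsA items).items.map Prod.fst).Nodup := by
  have h := PySem.Dict.nodup_keys_foldl_modify_key items
    (fun d => PySem.Dict.getD (PySem.Dict.mk d) "file" "") []
    (fun _ d => (· ++ [d])) PySem.Dict.empty (by simp [PySem.Dict.keys, PySem.Dict.empty])
  simpa [PySem.Dict.keys, pvBucketsA] using h

-- ===== VERDICT (by name: the statement is the Claim_ definition above) =====
theorem round_robin_by_file_spec : Claim_equal_round_robin_by_file := by
  unfold Claim_equal_round_robin_by_file
  intro items pf _dom
  unfold Spec_round_robin_by_file round_robin_by_file round_robin_by_file_alt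
  dsimp only
  have hbk : pvBucketsB items = pvBucketsA items := rfl
  rw [hbk]
  set bs := (pvBucketsA items).items with hbs
  have hnd : (bs.map Prod.fst).Nodup := pvBucketsA_keys_nodup items
  -- the running loop of A
  have hc0 : ∀ e ∈ bs, PySem.Dict.getD
      (bs.foldl (fun c e => c.insert e.1 (0 : Int)) PySem.Dict.empty) e.1 0 =
      ((pvMr pf.toNat 0 e.2 : Nat) : Int) := by
    intro e _
    rw [pvCounts0 bs PySem.Dict.empty (fun g => by simp [PySem.Dict.getD_empty])]
    simp [pvMr]
  have hst0 : pvStateQ pf.toNat 0 bs = bs := by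
    simp [pvStateQ, pvMr]
  have hloop := pvLoopA_spec pf bs hnd (pf.toNat + 1) 0
    (bs.foldl (fun c e => c.insert e.1 (0 : Int)) PySem.Dict.empty) []
    (by omega) (by omega) hc0
  rw [hst0] at hloop
  rw [hloop]
  simp only [Nat.sub_zero, Nat.zero_add, List.nil_append]
  -- B's round count is the same R
  have hcap : max pf 0 = ((pf.toNat : Nat) : Int) := (Int.ofNat_toNat pf).symm
  have hlong : bs.foldl (fun m e => max m (PySem.List.len e.2)) 0 = ((pvMN bs : Nat) : Int) := by
    rw [show (0 : Int) = ((0 : Nat) : Int) from rfl, pvLongest bs 0, pvMN, List.foldl_map]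
  have hrounds : min (max pf 0) (bs.foldl (fun m e => max m (PySem.List.len e.2)) 0) =
      ((min pf.toNat (pvMN bs) : Nat) : Int) := by
    rw [hcap, hlong]
    push_cast
    rfl
  rw [hrounds]
  refine congrArg₂ _ ?_ ?_
  · -- taken parts agree
    have hinner : ∀ (acc : List pvItem) (r' : Int),
        bs.foldl (fun acc2 e => if r' < PySem.List.len e.2 then acc2 ++ [PySem.List.pyGetD e.2 r' []] else acc2) acc =
          acc ++ bs.flatMap (fun e => if r' < PySem.List.len e.2 then [PySem.List.pyGetD e.2 r' []] else []) := by
      intro acc r'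
      rw [PySem.List.foldl_congr_mem bs _
        (fun acc2 e => acc2 ++ (if r' < PySem.List.len e.2 then [PySem.List.pyGetD e.2 r' []] else []))
        acc (by intro acc2 e _; by_cases h : r' < PySem.List.len e.2 <;> rw [PySem.List.len_eq] at h <;> simp [h]),
        PySem.List.foldl_append_eq_flatMap]
    rw [PySem.List.foldl_congr_mem _ _
      (fun acc r' => acc ++ bs.flatMap (fun e => if r' < PySem.List.len e.2 then [PySem.List.pyGetD e.2 r' []] else []))
      [] (by intro acc r' _; exact hinner acc r'),
      PySem.List.foldl_append_eq_flatMap, List.nil_append,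
      PySem.List.pyRange_one]
    simp only [Int.sub_zero, Int.toNat_natCast, Int.zero_add]
    rw [List.flatMap_map]
    rw [List.flatMap_congr (g := fun k => pvRoundT pf.toNat k bs) ?_]
    · -- flatten (map g (range R)) = (range R).flatMap g
      simp [List.flatMap_def]
    · intro k hk
      beta_reduce
      rw [pvRoundT]
      refine List.flatMap_congr ?_
      intro e _
      exact pvContribB pf k (by simp at hk; omega) e.2
  · -- leftover parts agree
    rw [PySem.List.foldl_append_eq_flatMap (g := fun e : String × List pvItem => e.2),
      PySem.List.foldl_append_eq_flatMap (g := fun e : String × List pvItem => PySem.List.slice e.2 (some (max pf 0))),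
      List.nil_append, List.nil_append, pvStateQ, List.flatMap_map]
    refine List.flatMap_congr ?_
    intro e he
    have hle : e.2.length ≤ pvMN bs :=
      (PySem.List.le_foldl_max (bs.map (fun e => e.2.length)) 0).2 _ (List.mem_map_of_mem he)
    rw [pvLeft_eq pf.toNat (min pf.toNat (pvMN bs)) e.2 (by omega),
      PySem.List.slice_from e.2 (le_max_right pf 0),
      show (max pf 0).toNat = pf.toNat by omega]
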